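-- pv_equiv track=rewrite | github.com/cifpfbmoll/practica-7-python-MASACR99 | exercise5.py | changeTheWorld
-- ===== SOURCE A (Python) =====
-- def changeTheWorld(phrase, vowel):
--     vowels = ['a','e','i','o','u']
--     changed_phrase = []
--     for i in phrase:
--         for j in i:
--             if j.lower() in vowels:
--                 changed_phrase.append(vowel)
--             else:
--                 changed_phrase.append(j)
--     return ''.join(changed_phrase)
-- ===== SOURCE B (Python) =====
-- def changeTheWorld(phrase, vowel):
--     # Split the flattened text into the maximal vowel-free segments,
--     # then glue them back together with the replacement vowel.
--     segments = []
--     cur = []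
--     for ch in ''.join(phrase):
--         if ch in 'aeiouAEIOU':
--             segments.append(''.join(cur))
--             cur = []
--         else:
--             cur.append(ch)
--     segments.append(''.join(cur))
--     return vowel.join(segments)
-- ===== Notes on version B (the rewrite author's own statement) =====
-- stated objective: alternative
-- what changed: Instead of A's per-character replace-and-append into one output list, B tokenizes the flattened text into maximal vowel-free segments and reassembles them with vowel.join(segments) (split-on-vowels then join).
import Mathlib
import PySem

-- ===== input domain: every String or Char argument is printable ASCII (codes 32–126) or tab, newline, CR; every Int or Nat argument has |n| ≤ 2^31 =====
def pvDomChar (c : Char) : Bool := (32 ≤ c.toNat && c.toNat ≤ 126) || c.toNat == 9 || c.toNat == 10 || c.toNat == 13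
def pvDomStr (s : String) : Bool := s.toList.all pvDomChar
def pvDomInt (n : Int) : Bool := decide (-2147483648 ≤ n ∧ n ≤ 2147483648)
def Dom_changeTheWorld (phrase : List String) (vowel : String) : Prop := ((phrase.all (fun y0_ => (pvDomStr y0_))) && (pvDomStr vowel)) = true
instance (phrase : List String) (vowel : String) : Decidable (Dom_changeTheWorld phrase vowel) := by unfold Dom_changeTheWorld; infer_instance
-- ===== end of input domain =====

-- B replaces A's per-character replace-and-append by a split-on-vowels /
-- join-with-replacement decomposition (alternative algorithm, same cost;
-- return value only, no mutation in either version).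

-- ===== PORT A =====
-- for a single char j, Python's j.lower() is exactly PySem.Chars.lowerChar j
def changeTheWorld (phrase : List String) (vowel : String) : String :=
  let vowels : List Char := ['a','e','i','o','u']
  let changed_phrase : List String :=
    phrase.foldl (fun acc i =>
      i.toList.foldl (fun acc j =>
        if PySem.Chars.lowerChar j ∈ vowels then acc ++ [vowel] else acc ++ [String.ofList [j]]) acc) []
  PySem.Str.join "" changed_phrase

-- ===== PORT B =====
-- `ch in 'aeiouAEIOU'` on a single char is exactly membership of its code point;
-- state = (segments, cur): finished segments and the chars of the current segment
def changeTheWorld_alt (phrase : List String) (vowel : String) : String :=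
  let st : List String × List Char :=
    (PySem.Str.join "" phrase).toList.foldl
      (fun st ch =>
        if ch ∈ "aeiouAEIOU".toList then (st.1 ++ [String.ofList st.2], [])
        else (st.1, st.2 ++ [ch]))
      ([], [])
  PySem.Str.join vowel (st.1 ++ [String.ofList st.2])

-- ===== PRECONDITION & SPEC =====
def Spec_changeTheWorld (phrase : List String) (vowel : String) (out : String) : Prop := out = changeTheWorld_alt phrase vowel
instance (phrase : List String) (vowel : String) (out : String) : Decidable (Spec_changeTheWorld phrase vowel out) := by unfold Spec_changeTheWorld; infer_instance

-- ===== CLAIM (what is proved, stated in full; the proofs are below) =====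
def Claim_equal_changeTheWorld : Prop := ∀ (phrase : List String) (vowel : String), Dom_changeTheWorld phrase vowel → Spec_changeTheWorld phrase vowel (changeTheWorld phrase vowel)

-- ===== LEMMAS AND PROOFS =====

-- per-character replacement, as a List Char function (the common target of both proofs)
def pvRepl (vowel : String) (c : Char) : List Char :=
  if c ∈ (['a','e','i','o','u','A','E','I','O','U'] : List Char) then vowel.toList else [c]

def pvReplA (vowel : String) (j : Char) : String :=
  if PySem.Chars.lowerChar j ∈ (['a','e','i','o','u'] : List Char) then vowel else String.ofList [j]

theorem pvOfNat_toNat (n : Nat) (h : n ≤ 200) : (Char.ofNat n).toNat = n := by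
  rw [Char.toNat_ofNat, if_pos]
  unfold Nat.isValidChar
  left
  omega

theorem pvChar_of_toNat (c : Char) (n : Nat) (h : n ≤ 200) (hn : c.toNat = n) :
    c = Char.ofNat n := by
  apply Char.ext
  apply UInt32.toNat_inj.mp
  show c.toNat = (Char.ofNat n).toNat
  rw [pvOfNat_toNat n h, hn]

theorem pvLowerChar_mem (c : Char) :
    PySem.Chars.lowerChar c ∈ (['a','e','i','o','u'] : List Char) ↔
      c ∈ (['a','e','i','o','u','A','E','I','O','U'] : List Char) := by
  constructor
  · intro h
    unfold PySem.Chars.lowerChar at h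
    split at h
    · next hu =>
      unfold PySem.Chars.isupper at hu
      simp only [Bool.and_eq_true, decide_eq_true_eq] at hu
      obtain ⟨h1, h2⟩ := hu
      rw [Char.le_def] at h1 h2
      have hb1 : 65 ≤ c.toNat := UInt32.le_iff_toNat_le.mp h1
      have hb2 : c.toNat ≤ 90 := UInt32.le_iff_toNat_le.mp h2
      have hv : (Char.ofNat (c.toNat + 32)).toNat = c.toNat + 32 :=
        pvOfNat_toNat _ (by omega)
      have key : ∀ l : Char, Char.ofNat (c.toNat + 32) = l → c.toNat = l.toNat - 32 := by
        intro l hl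
        have := congrArg Char.toNat hl
        rw [hv] at this
        omega
      simp only [List.mem_cons, List.not_mem_nil, or_false] at h
      rcases h with h | h | h | h | h
      · have : c.toNat = 65 := by have := key _ h; simpa using this
        simp [pvChar_of_toNat c 65 (by omega) this]
      · have : c.toNat = 69 := by have := key _ h; simpa using this
        simp [pvChar_of_toNat c 69 (by omega) this]
      · have : c.toNat = 73 := by have := key _ h; simpa using this
        simp [pvChar_of_toNat c 73 (by omega) this]
      · have : c.toNat = 79 := by have := key _ h; simpa using this
        simp [pvChar_of_toNat c 79 (by omega) this]
      · have : c.toNat = 85 := by have := key _ h; simpa using this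
        simp [pvChar_of_toNat c 85 (by omega) this]
    · simp only [List.mem_cons, List.not_mem_nil, or_false] at h ⊢
      tauto
  · intro h
    fin_cases h <;> decide

-- ---- A-side characterisation ----

theorem pvInner (vowel : String) (cs : List Char) (acc : List String) :
    cs.foldl (fun acc j =>
        if PySem.Chars.lowerChar j ∈ (['a','e','i','o','u'] : List Char)
        then acc ++ [vowel] else acc ++ [String.ofList [j]]) acc
      = acc ++ cs.map (pvReplA vowel) := by
  induction cs generalizing acc with
  | nil => simp
  | cons c cs ih =>
    simp only [List.foldl_cons, List.map_cons, ih, pvReplA]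
    split <;> simp

theorem pvOuter (vowel : String) (phrase : List String) (acc : List String) :
    phrase.foldl (fun acc i =>
        i.toList.foldl (fun acc j =>
          if PySem.Chars.lowerChar j ∈ (['a','e','i','o','u'] : List Char)
          then acc ++ [vowel] else acc ++ [String.ofList [j]]) acc) acc
      = acc ++ (phrase.flatMap (·.toList)).map (pvReplA vowel) := by
  induction phrase generalizing acc with
  | nil => simp
  | cons s rest ih =>
    rw [List.foldl_cons, pvInner, ih]
    simp

theorem pvJoinEmpty (L : List (List Char)) :
    PySem.Chars.join [] L = L.flatten := by
  induction L with
  | nil => simp [PySem.Chars.join_nil]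
  | cons x xs ih =>
    cases xs with
    | nil => simp [PySem.Chars.join_singleton]
    | cons y ys => simp [PySem.Chars.join_cons_cons, ih]

theorem pvA_toList (phrase : List String) (vowel : String) :
    (changeTheWorld phrase vowel).toList
      = (phrase.flatMap (·.toList)).flatMap (pvRepl vowel) := by
  unfold changeTheWorld
  simp only [pvOuter, List.nil_append, PySem.Str.toList_join]
  rw [show ("" : String).toList = [] from rfl, pvJoinEmpty, List.map_map, ← List.flatMap_def]
  congr 1
  funext c
  simp only [Function.comp, pvReplA, pvRepl]
  by_cases hc : c ∈ (['a','e','i','o','u','A','E','I','O','U'] : List Char)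
  · simp [(pvLowerChar_mem c).mpr hc, hc]
  · have hl : PySem.Chars.lowerChar c ∉ (['a','e','i','o','u'] : List Char) :=
      fun hx => hc ((pvLowerChar_mem c).mp hx)
    simp [hl, hc]

-- ---- B-side characterisation ----

theorem pvVowList : ("aeiouAEIOU".toList) = (['a','e','i','o','u','A','E','I','O','U'] : List Char) := by
  decide

theorem pvRepl_eq (vowel : String) (c : Char) :
    pvRepl vowel c = if c ∈ "aeiouAEIOU".toList then vowel.toList else [c] := by
  rw [pvRepl, pvVowList]

-- appending a char to the LAST segment, as a list operation
def pvAddToLast (c : Char) : List String → List String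
  | [] => []
  | [x] => [x ++ String.ofList [c]]
  | x :: y :: xs => x :: pvAddToLast c (y :: xs)

theorem pvAddToLast_snoc (c : Char) (L : List String) (x : String) :
    pvAddToLast c (L ++ [x]) = L ++ [x ++ String.ofList [c]] := by
  induction L with
  | nil => rfl
  | cons a L ih =>
    cases L with
    | nil => rfl
    | cons b L => simpa [pvAddToLast] using ih

theorem pvAddToLast_ne_nil (c : Char) (L : List String) (h : L ≠ []) :
    pvAddToLast c L ≠ [] := by
  cases L with
  | nil => exact absurd rfl h
  | cons x xs => cases xs <;> simp [pvAddToLast]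

theorem pvJoin_append_empty (v : List Char) (L : List (List Char)) (h : L ≠ []) :
    PySem.Chars.join v (L ++ [[]]) = PySem.Chars.join v L ++ v := by
  induction L with
  | nil => exact absurd rfl h
  | cons x xs ih =>
    cases xs with
    | nil => simp [PySem.Chars.join_cons_cons, PySem.Chars.join_singleton]
    | cons y ys =>
      simp only [List.cons_append, PySem.Chars.join_cons_cons]
      rw [show (y :: (ys ++ [[]]) : List (List Char)) = (y :: ys) ++ [[]] from rfl,
        ih (by simp)]
      simp

theorem pvJoin_addToLast (v : List Char) (c : Char) (L : List String) (h : L ≠ []) :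
    PySem.Chars.join v ((pvAddToLast c L).map String.toList)
      = PySem.Chars.join v (L.map String.toList) ++ [c] := by
  induction L with
  | nil => exact absurd rfl h
  | cons x xs ih =>
    cases xs with
    | nil => simp [pvAddToLast, PySem.Chars.join_singleton]
    | cons y ys =>
      have hne : pvAddToLast c (y :: ys) ≠ [] := pvAddToLast_ne_nil c _ (by simp)
      obtain ⟨z, zs, hE⟩ : ∃ z zs, pvAddToLast c (y :: ys) = z :: zs := by
        cases hQ : pvAddToLast c (y :: ys) with
        | nil => exact absurd hQ hne
        | cons z zs => exact ⟨z, zs, rfl⟩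
      rw [show pvAddToLast c (x :: y :: ys) = x :: pvAddToLast c (y :: ys) from rfl, hE]
      simp only [List.map_cons, PySem.Chars.join_cons_cons]
      rw [← List.map_cons, ← hE, ih (by simp)]
      simp [List.append_assoc]

theorem pvB_invariant (vowel : String) (cs : List Char) (segs : List String) (cur : List Char) :
    (PySem.Str.join vowel
        (((cs.foldl (fun st ch =>
            if ch ∈ "aeiouAEIOU".toList then (st.1 ++ [String.ofList st.2], ([] : List Char))
            else (st.1, st.2 ++ [ch])) (segs, cur)).1
          ++ [String.ofList (cs.foldl (fun st ch =>
            if ch ∈ "aeiouAEIOU".toList then (st.1 ++ [String.ofList st.2], ([] : List Char))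
            else (st.1, st.2 ++ [ch])) (segs, cur)).2]))).toList
      = (PySem.Str.join vowel (segs ++ [String.ofList cur])).toList
          ++ cs.flatMap (pvRepl vowel) := by
  induction cs generalizing segs cur with
  | nil => simp
  | cons c cs ih =>
    rw [List.foldl_cons, List.flatMap_cons, pvRepl_eq]
    split
    · next hc =>
      rw [ih (segs ++ [String.ofList cur]) [], PySem.Str.toList_join, PySem.Str.toList_join,
        show String.ofList ([] : List Char) = "" from rfl,
        List.map_append (l₂ := ([""] : List String)),
        show (([""] : List String).map String.toList : List (List Char)) = [[]] from rfl,
        pvJoin_append_empty _ _ (by simp)]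
      simp [List.append_assoc]
    · next hc =>
      rw [ih segs (cur ++ [c]), PySem.Str.toList_join, PySem.Str.toList_join,
        String.ofList_append, ← pvAddToLast_snoc, pvJoin_addToLast _ _ _ (by simp)]
      simp [List.append_assoc]

theorem pvB_toList (phrase : List String) (vowel : String) :
    (changeTheWorld_alt phrase vowel).toList
      = (phrase.flatMap (·.toList)).flatMap (pvRepl vowel) := by
  unfold changeTheWorld_alt
  rw [pvB_invariant vowel _ [] []]
  rw [List.nil_append, PySem.Str.toList_join,
    show (([String.ofList []] : List String).map String.toList : List (List Char)) = [[]] from rfl,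
    PySem.Chars.join_singleton, PySem.Str.toList_join,
    show ("" : String).toList = [] from rfl, pvJoinEmpty, ← List.flatMap_def]
  simp

-- ===== VERDICT (by name: the statement is the Claim_ definition above) =====
theorem changeTheWorld_spec : Claim_equal_changeTheWorld := by
  intro phrase vowel _
  unfold Spec_changeTheWorld
  rw [← String.ofList_toList (s := changeTheWorld phrase vowel),
    ← String.ofList_toList (s := changeTheWorld_alt phrase vowel),
    pvA_toList, pvB_toList]
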